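-- pv_equiv track=rewrite | github.com/ryandchandra/ii4031-tucil-2 | ModifiedRC4Lib.py | ModifiedKSA
-- ===== SOURCE A (Python) =====
-- def StringToByteIntArray(string):
--     byteint_array = []
--
--     for char in string:
--         byteint_array.append(ord(char))
--
--     return byteint_array
--
-- def ModifiedKey(key):
--     # Create Modified key in Stream Cipher
--     # Input : key (string any length)
--     # Output : modified key in numbers (length >= 256)
--
--     # Change key to numbers
--     modified_key = StringToByteIntArray(key)
--
--     # Modified key if length <256
--     i = len(modified_key)
--     while (i<256):
--         if (i==1):
--             modified_key.append((2*modified_key[i-1])%256)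
--         else:
--             modified_key.append((modified_key[i-1]+modified_key[i-2])%256)
--         i = len(modified_key)
--
--     return modified_key
--
-- def ModifiedKSA(key):
--     # Create Modified KSA in Stream Cipher
--     # Input : key (string any length)
--     # Output : larik S teracak (numbers 0-255)
--
--     # Inisialisasi larik S
--     larik_S = []
--     for i in range(256):
--         larik_S.append(i)
--
--     # Pengacakan larik S
--     # Modifikasi: larik_S[i] --> larik_S[K[i]]
--     # Sehingga menghasilkan nilai j yang lebih acak
--     K = ModifiedKey(key)
--     j = 0
--     for i in range(256):
--         j = (j+larik_S[K[i]]+K[i])%256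
--         larik_S[i], larik_S[j] = larik_S[j], larik_S[i]
--
--     return larik_S
-- ===== SOURCE B (Python) =====
-- def _fib_mod(t):
--     # t-th Fibonacci number mod 256 (F(0)=0, F(1)=1), iterated pair
--     x, y = 0, 1
--     for _ in range(t):
--         x, y = y, (x + y) % 256
--     return x
--
-- def ModifiedKSA(key):
--     # Closed form: every extended key byte beyond the raw key is a Fibonacci-coefficient
--     # linear combination of the last two seed bytes; the permutation is kept as a sparse
--     # dict over the identity instead of a swapped list.
--     K = [ord(c) for c in key]
--     if len(K) == 1:
--         K.append((2 * K[0]) % 256)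
--     if 2 <= len(K) < 256:
--         a, b = K[-2], K[-1]
--         K += [(_fib_mod(t + 2) * b + _fib_mod(t + 1) * a) % 256 for t in range(256 - len(K))]
--     perm = {}
--     j = 0
--     for i in range(256):
--         k = K[i]
--         j = (j + perm.get(k, k) + k) % 256
--         perm[i], perm[j] = perm.get(j, j), perm.get(i, i)
--     return [perm.get(i, i) for i in range(256)]
-- ===== Notes on version B (the rewrite author's own statement) =====
-- stated objective: alternative
-- what changed: B replaces A's list-appending Fibonacci recurrence by a closed-form key schedule (each extended byte is a Fibonacci-coefficient linear combination of the last two seed bytes, mod 256) and keeps the permutation as a sparse dict over the identity instead of a swapped 256-element list.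
import Mathlib
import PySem

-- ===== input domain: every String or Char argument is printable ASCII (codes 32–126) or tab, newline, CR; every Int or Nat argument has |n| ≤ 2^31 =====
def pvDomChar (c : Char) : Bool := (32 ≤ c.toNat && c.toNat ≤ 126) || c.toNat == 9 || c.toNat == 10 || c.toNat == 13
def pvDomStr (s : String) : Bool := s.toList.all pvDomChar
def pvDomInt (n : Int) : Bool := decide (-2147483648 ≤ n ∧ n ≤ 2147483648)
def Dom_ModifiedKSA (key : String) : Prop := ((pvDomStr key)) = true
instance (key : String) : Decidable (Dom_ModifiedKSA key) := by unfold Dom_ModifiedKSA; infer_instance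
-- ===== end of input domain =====

-- B computes the extended key in closed form (Fibonacci-coefficient combination of the
-- last two seed bytes) and keeps the permutation as a sparse dict over the identity;
-- objective: alternative algorithm of the same cost.

-- ===== PORT A =====

-- StringToByteIntArray
def pvStrToBytes (s : String) : List Int :=
  s.toList.foldl (fun acc c => acc ++ [(c.toNat : Int)]) []

-- the while-loop of ModifiedKey (extend until length ≥ 256); on the input where
-- Python raises IndexError (empty key) the pyGet? is none and we stop.
def pvExtendKey (m : List Int) : List Int :=
  if _h : m.length < 256 then
    if m.length = 1 then
      match PySem.List.pyGet? m ((m.length : Int) - 1) with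
      | some a => pvExtendKey (m ++ [PySem.Int.mod (2 * a) 256])
      | none => m
    else
      match PySem.List.pyGet? m ((m.length : Int) - 1), PySem.List.pyGet? m ((m.length : Int) - 2) with
      | some a, some b => pvExtendKey (m ++ [PySem.Int.mod (a + b) 256])
      | _, _ => m
  else m
termination_by 256 - m.length
decreasing_by all_goals simp; omega

def pvModifiedKey (key : String) : List Int := pvExtendKey (pvStrToBytes key)

-- initialization loop of larik_S
def pvInitS : List Int := (List.range 256).foldl (fun acc (i : Nat) => acc ++ [(i : Int)]) []

-- the scramble loop: for i in range(256)
def pvLoopA (K : List Int) (i : Nat) (S : List Int) (j : Int) : List Int :=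
  if i < 256 then
    let k := (PySem.List.pyGet? K (i : Int)).getD 0
    let j' := PySem.Int.mod (j + (PySem.List.pyGet? S k).getD 0 + k) 256
    let si := (PySem.List.pyGet? S (i : Int)).getD 0
    let sj := (PySem.List.pyGet? S j').getD 0
    pvLoopA K (i+1) ((S.set i sj).set j'.toNat si) j'
  else S
termination_by 256 - i

def ModifiedKSA (key : String) : List Int :=
  pvLoopA (pvModifiedKey key) 0 pvInitS 0

-- ===== PORT B =====

-- _fib_mod: t-th Fibonacci number mod 256 by the iterated pair (x, y)
def pvFibMod (t : Nat) : Int :=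
  ((List.range t).foldl (fun (p : Int × Int) _ => (p.2, PySem.Int.mod (p.1 + p.2) 256)) (0, 1)).1

-- B's key schedule: raw bytes, the len==1 doubling, then the closed-form comprehension
def pvKeyB (key : String) : List Int :=
  let K0 := key.toList.map (fun c => (c.toNat : Int))
  let K := if K0.length = 1
           then K0 ++ [PySem.Int.mod (2 * ((PySem.List.pyGet? K0 0).getD 0)) 256]
           else K0
  if 2 ≤ K.length ∧ K.length < 256 then
    let a := (PySem.List.pyGet? K (-2)).getD 0
    let b := (PySem.List.pyGet? K (-1)).getD 0
    K ++ (List.range (256 - K.length)).map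
          (fun t => PySem.Int.mod (pvFibMod (t+2) * b + pvFibMod (t+1) * a) 256)
  else K

-- B's scramble: sparse dict perm over the identity, perm.get(x, x)
def pvLoopB (K : List Int) (i : Nat) (d : PySem.Dict Int Int) (j : Int) : PySem.Dict Int Int :=
  if i < 256 then
    let k := (PySem.List.pyGet? K (i : Int)).getD 0
    let j' := PySem.Int.mod (j + PySem.Dict.getD d k k + k) 256
    let pi := PySem.Dict.getD d (i : Int) (i : Int)
    let pj := PySem.Dict.getD d j' j'
    pvLoopB K (i+1) ((d.insert (i : Int) pj).insert j' pi) j'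
  else d
termination_by 256 - i

def ModifiedKSA_alt (key : String) : List Int :=
  let K := pvKeyB key
  let d := pvLoopB K 0 PySem.Dict.empty 0
  (List.range 256).map (fun (i : Nat) => PySem.Dict.getD d (i : Int) (i : Int))

-- ===== PRECONDITION & SPEC =====
-- On the empty key both A and B raise IndexError, so it is excluded.
def Pre_ModifiedKSA (key : String) : Prop := key ≠ ""
instance (key : String) : Decidable (Pre_ModifiedKSA key) := by unfold Pre_ModifiedKSA; infer_instance
def pvWitness_ModifiedKSA : String := "k"

def Spec_ModifiedKSA (key : String) (out : List Int) : Prop := out = ModifiedKSA_alt key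
instance (key : String) (out : List Int) : Decidable (Spec_ModifiedKSA key out) := by unfold Spec_ModifiedKSA; infer_instance

-- ===== CLAIM (what is proved, stated in full; the proofs are below) =====
def Claim_equal_ModifiedKSA : Prop := ∀ (key : String), Dom_ModifiedKSA key → Pre_ModifiedKSA key → Spec_ModifiedKSA key (ModifiedKSA key)

-- ===== LEMMAS AND PROOFS =====

-- pure Fibonacci-mod-256 recursion, the proof-side view of pvFibMod
def pvFm : Nat → Int
  | 0 => 0
  | 1 => 1
  | (t+2) => PySem.Int.mod (pvFm t + pvFm (t+1)) 256

theorem pvFibMod_state (t : Nat) :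
    (List.range t).foldl (fun (p : Int × Int) _ => (p.2, PySem.Int.mod (p.1 + p.2) 256)) (0, 1)
      = (pvFm t, pvFm (t+1)) := by
  induction t with
  | zero => simp [pvFm]
  | succ n ih => rw [List.range_succ, List.foldl_append, ih]; rfl

theorem pvFibMod_eq (t : Nat) : pvFibMod t = pvFm t := by
  unfold pvFibMod; rw [pvFibMod_state]

-- the closed-form coefficient: pvCF seclast last t = extended byte number t
def pvCF (a b : Int) (t : Nat) : Int :=
  PySem.Int.mod (pvFm (t+2) * b + pvFm (t+1) * a) 256

theorem pvCF_zero (a b : Int) : pvCF a b 0 = PySem.Int.mod (b + a) 256 := by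
  unfold pvCF
  norm_num [pvFm, PySem.Int.mod_eq_emod_of_pos]

theorem pvCF_shift (a b : Int) (t : Nat) :
    pvCF a b (t+1) = pvCF b (PySem.Int.mod (b + a) 256) t := by
  unfold pvCF
  have h256 : (0:Int) < 256 := by norm_num
  have hFm : pvFm (t+3) = PySem.Int.mod (pvFm (t+1) + pvFm (t+2)) 256 := rfl
  simp only [show t+1+2 = t+3 from rfl, show t+1+1 = t+2 from rfl, hFm,
    PySem.Int.mod_eq_emod_of_pos h256]
  set x := pvFm (t+1)
  set y := pvFm (t+2)
  have l1 : ((x + y) % 256 * b + y * a) % 256 = ((x + y) * b + y * a) % 256 := by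
    rw [Int.add_emod, Int.mul_emod, Int.emod_emod_of_dvd _ dvd_rfl, ← Int.mul_emod, ← Int.add_emod]
  have l2 : (y * ((b + a) % 256) + x * b) % 256 = (y * (b + a) + x * b) % 256 := by
    rw [Int.add_emod, Int.mul_emod, Int.emod_emod_of_dvd _ dvd_rfl, ← Int.mul_emod, ← Int.add_emod]
  rw [l1, l2]
  ring_nf

theorem pv_foldl_app {α β : Type} (f : α → β) (l : List α) (acc : List β) :
    l.foldl (fun a x => a ++ [f x]) acc = acc ++ l.map f := by
  induction l generalizing acc with
  | nil => simp
  | cons x xs ih => simp [List.foldl, ih]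

theorem pv_strToBytes_eq (s : String) :
    pvStrToBytes s = s.toList.map (fun c => (c.toNat : Int)) := by
  unfold pvStrToBytes; rw [pv_foldl_app]; simp

theorem pv_initS_eq : pvInitS = (List.range 256).map (fun (i : Nat) => (i : Int)) := by
  unfold pvInitS; rw [pv_foldl_app]; simp

-- pyGet? at a nonnegative in-range index, in getD form
theorem pv_get_some (m : List Int) (i : Int) (h0 : 0 ≤ i) (h1 : i < (m.length : Int)) :
    PySem.List.pyGet? m i = some (m.getD i.toNat 0) := by
  rw [PySem.List.pyGet?_eq_some_getElem m h0 h1, List.getD_eq_getElem _ _ (by omega)]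

-- pvExtendKey of a list of length ≥ 2 equals the closed-form extension
theorem pv_ext_closed (q : Nat) : ∀ m : List Int, 256 - m.length ≤ q → 2 ≤ m.length →
    pvExtendKey m = m ++ (List.range (256 - m.length)).map
      (pvCF (m.getD (m.length-2) 0) (m.getD (m.length-1) 0)) := by
  induction q with
  | zero =>
    intro m hq h2
    rw [pvExtendKey]
    have hge : ¬ m.length < 256 := by omega
    simp [hge, show 256 - m.length = 0 from by omega]
  | succ q ih =>
    intro m hq h2
    by_cases hlt : m.length < 256
    · have hne1 : ¬ m.length = 1 := by omega
      have hgl : PySem.List.pyGet? m ((m.length : Int) - 1) = some (m.getD (m.length - 1) 0) := by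
        have := pv_get_some m ((m.length : Int) - 1) (by omega) (by omega)
        simpa [show (((m.length : Int)) - 1).toNat = m.length - 1 from by omega] using this
      have hgs : PySem.List.pyGet? m ((m.length : Int) - 2) = some (m.getD (m.length - 2) 0) := by
        have := pv_get_some m ((m.length : Int) - 2) (by omega) (by omega)
        simpa [show (((m.length : Int)) - 2).toNat = m.length - 2 from by omega] using this
      have hunf : pvExtendKey m
          = pvExtendKey (m ++ [PySem.Int.mod (m.getD (m.length - 1) 0 + m.getD (m.length - 2) 0) 256]) := by
        conv_lhs => rw [pvExtendKey]
        rw [dif_pos hlt, if_neg hne1, hgl, hgs]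
      set a0 := m.getD (m.length - 1) 0 with ha0
      set b0 := m.getD (m.length - 2) 0 with hb0
      set c := PySem.Int.mod (a0 + b0) 256 with hc
      have hlen' : (m ++ [c]).length = m.length + 1 := by simp
      have ih' := ih (m ++ [c]) (by omega) (by omega)
      have g1 : (m ++ [c]).getD ((m ++ [c]).length - 1) 0 = c := by
        rw [hlen', show m.length + 1 - 1 = m.length from by omega,
            List.getD_eq_getElem?_getD, List.getElem?_append_right (le_refl _)]
        simp
      have g2 : (m ++ [c]).getD ((m ++ [c]).length - 2) 0 = a0 := by
        rw [hlen', show m.length + 1 - 2 = m.length - 1 from by omega,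
            List.getD_eq_getElem?_getD,
            List.getElem?_append_left (show m.length - 1 < m.length from by omega),
            ha0, List.getD_eq_getElem?_getD]
      rw [hunf, ih', g1, g2, hlen']
      have hq1 : 256 - m.length = (256 - (m.length + 1)) + 1 := by omega
      rw [hq1, List.range_succ_eq_map, List.map_cons, List.map_map]
      have hcf0 : pvCF b0 a0 0 = c := by rw [pvCF_zero, hc]
      have hcfs : (pvCF b0 a0 ∘ Nat.succ) = pvCF a0 c := by
        funext t
        simp only [Function.comp]
        rw [show Nat.succ t = t + 1 from rfl, pvCF_shift, hc]
      rw [hcf0, hcfs]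
      simp
    · rw [pvExtendKey]
      simp [hlt, show 256 - m.length = 0 from by omega]

-- B's key schedule equals A's ModifiedKey
theorem pv_keyB_eq (key : String) (h : key ≠ "") :
    pvKeyB key = pvModifiedKey key := by
  unfold pvKeyB pvModifiedKey
  rw [← pv_strToBytes_eq]
  set m := pvStrToBytes key with hm
  have hlen : 1 ≤ m.length := by
    rw [hm, pv_strToBytes_eq]
    simp only [List.length_map]
    rcases Nat.eq_zero_or_pos key.toList.length with h0 | h0
    · exact absurd (String.ext (by simpa using List.length_eq_zero_iff.mp h0)) h
    · exact h0
  by_cases h1 : m.length = 1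
  · -- the doubling special case, then the closed form on the length-2 seed
    simp only [h1, if_true]
    have hg0 : PySem.List.pyGet? m 0 = some (m.getD 0 0) := by
      have := pv_get_some m 0 (by omega) (by omega)
      simpa using this
    rw [hg0, Option.getD_some]
    set a := m.getD 0 0 with hadef
    set c := PySem.Int.mod (2 * a) 256 with hcdef
    have hlen2 : (m ++ [c]).length = 2 := by simp [h1]
    have hcond : 2 ≤ (m ++ [c]).length ∧ (m ++ [c]).length < 256 := by omega
    rw [if_pos hcond]
    -- A's side: one unfolding step (length 1), then the closed form on m ++ [c]
    have hg1 : PySem.List.pyGet? m ((m.length : Int) - 1) = some a := by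
      have := pv_get_some m ((m.length : Int) - 1) (by omega) (by omega)
      rw [this, hadef]
      congr 1
      congr 1
      omega
    have hstep : pvExtendKey m = pvExtendKey (m ++ [c]) := by
      conv_lhs => rw [pvExtendKey]
      rw [dif_pos (show m.length < 256 from by omega), if_pos h1, hg1]
    rw [hstep, pv_ext_closed 256 (m ++ [c]) (by omega) (by omega), hlen2]
    have e1 : (PySem.List.pyGet? (m ++ [c]) (-2)).getD 0 = (m ++ [c]).getD (2 - 2) 0 := by
      rw [PySem.List.pyGet?_neg_ofNat _ 2 (by omega) (by omega), hlen2]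
      rw [List.getElem?_eq_getElem (by omega), Option.getD_some,
          List.getD_eq_getElem _ _ (by omega)]
    have e2 : (PySem.List.pyGet? (m ++ [c]) (-1)).getD 0 = (m ++ [c]).getD (2 - 1) 0 := by
      rw [PySem.List.pyGet?_neg_ofNat _ 1 (by omega) (by omega), hlen2]
      rw [List.getElem?_eq_getElem (by omega), Option.getD_some,
          List.getD_eq_getElem _ _ (by omega)]
    rw [e1, e2]
    simp only [pvFibMod_eq]; rfl
  · simp only [h1, if_false]
    by_cases h2 : 2 ≤ m.length ∧ m.length < 256
    · rw [if_pos h2, pv_ext_closed 256 m (by omega) (by omega)]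
      have e1 : (PySem.List.pyGet? m (-2)).getD 0 = m.getD (m.length - 2) 0 := by
        rw [PySem.List.pyGet?_neg_ofNat _ 2 (by omega) (by omega)]
        rw [List.getElem?_eq_getElem (by omega), Option.getD_some,
            List.getD_eq_getElem _ _ (by omega)]
      have e2 : (PySem.List.pyGet? m (-1)).getD 0 = m.getD (m.length - 1) 0 := by
        rw [PySem.List.pyGet?_neg_ofNat _ 1 (by omega) (by omega)]
        rw [List.getElem?_eq_getElem (by omega), Option.getD_some,
            List.getD_eq_getElem _ _ (by omega)]
      rw [e1, e2]
      simp only [pvFibMod_eq]; rfl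
    · rw [if_neg h2]
      have hge : ¬ m.length < 256 := by omega
      rw [pvExtendKey]
      simp [hge]

-- bounds on the extended key entries
theorem pv_ext_mem (m : List Int) (hm : ∀ v ∈ m, 0 ≤ v ∧ v < 256) :
    ∀ v ∈ pvExtendKey m, 0 ≤ v ∧ v < 256 := by
  fun_induction pvExtendKey m with
  | case1 m h h1 a ha ih =>
      exact fun v hv => ih (by
        intro w hw
        rcases List.mem_append.mp hw with hw | hw
        · exact hm w hw
        · simp only [List.mem_singleton] at hw
          subst hw
          exact ⟨PySem.Int.mod_nonneg _ (by norm_num), PySem.Int.mod_lt _ (by norm_num)⟩) v hv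
  | case2 m h h1 ha => exact hm
  | case3 m h h1 a b ha hb ih =>
      exact fun v hv => ih (by
        intro w hw
        rcases List.mem_append.mp hw with hw | hw
        · exact hm w hw
        · simp only [List.mem_singleton] at hw
          subst hw
          exact ⟨PySem.Int.mod_nonneg _ (by norm_num), PySem.Int.mod_lt _ (by norm_num)⟩) v hv
  | case4 m h h1 hx => exact hm
  | case5 m h => exact hm

theorem pv_ext_len (m : List Int) (h1 : 1 ≤ m.length) : 256 ≤ (pvExtendKey m).length := by
  fun_induction pvExtendKey m with
  | case1 m h h1' a ha ih => exact ih (by simp)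
  | case2 m h h1' ha =>
      exfalso
      rw [PySem.List.pyGet?_eq_none_iff] at ha
      exact ha (by constructor <;> omega)
  | case3 m h h1' a b ha hb ih => exact ih (by simp)
  | case4 m h h1' hx =>
      exfalso
      exact hx _ _ (PySem.List.pyGet?_eq_some_getElem m (i := (m.length : Int) - 1) (by omega) (by omega))
                   (PySem.List.pyGet?_eq_some_getElem m (i := (m.length : Int) - 2) (by omega) (by omega))
  | case5 m h => omega

-- getD-level set lemmas
theorem pv_getD_set_self (l : List Int) (n : Nat) (v : Int) (h : n < l.length) :
    (l.set n v).getD n 0 = v := by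
  rw [List.getD_eq_getElem _ _ (by simpa using h)]
  exact List.getElem_set_self _

theorem pv_getD_set_ne (l : List Int) (n m : Nat) (v : Int) (h : n ≠ m) :
    (l.set n v).getD m 0 = l.getD m 0 := by
  by_cases hm : m < l.length
  · rw [List.getD_eq_getElem _ _ (by simpa using hm), List.getElem_set_ne h,
        List.getD_eq_getElem _ _ hm]
  · rw [List.getD_eq_getElem?_getD, List.getD_eq_getElem?_getD,
        List.getElem?_set_ne h]

-- simulation: the sparse-dict loop realizes the list loop
theorem pv_loop_sim (K : List Int) (hKlen : 256 ≤ K.length)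
    (hK : ∀ v ∈ K, 0 ≤ v ∧ v < 256) :
    ∀ (c i : Nat) (S : List Int) (d : PySem.Dict Int Int) (j : Int),
      i + c = 256 → S.length = 256 →
      (∀ x : Nat, x < 256 → PySem.Dict.getD d (x : Int) (x : Int) = S.getD x 0) →
      (∀ x : Nat, x < 256 →
        PySem.Dict.getD (pvLoopB K i d j) (x : Int) (x : Int) = (pvLoopA K i S j).getD x 0)
      ∧ (pvLoopA K i S j).length = 256 := by
  intro c
  induction c with
  | zero =>
    intro i S d j hic hSlen hrel
    have hi : ¬ i < 256 := by omega
    rw [pvLoopA, pvLoopB]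
    simp only [hi, if_false]
    exact ⟨hrel, hSlen⟩
  | succ c ih =>
    intro i S d j hic hSlen hrel
    have hi : i < 256 := by omega
    rw [pvLoopA, pvLoopB]
    simp only [hi, if_true]
    -- the key byte
    have hKg : (PySem.List.pyGet? K (i : Int)).getD 0 = K[i]'(by omega) := by
      rw [PySem.List.pyGet?_natCast, List.getElem?_eq_getElem (by omega)]; rfl
    set k := K[i]'(by omega) with hkdef
    have hkb : 0 ≤ k ∧ k < 256 := hK k (List.getElem_mem _)
    have hkcast : ((k.toNat : Nat) : Int) = k := Int.toNat_of_nonneg hkb.1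
    have hSk : (PySem.List.pyGet? S k).getD 0 = S.getD k.toNat 0 := by
      rw [pv_get_some S k hkb.1 (by omega), Option.getD_some]
    have hdk : PySem.Dict.getD d k k = S.getD k.toNat 0 := by
      rw [← hkcast]; exact hrel k.toNat (by omega)
    have hSi : (PySem.List.pyGet? S (i : Int)).getD 0 = S.getD i 0 := by
      have := pv_get_some S (i : Int) (by omega) (by omega)
      simp only [Int.toNat_natCast] at this
      rw [this, Option.getD_some]
    have hdi : PySem.Dict.getD d (i : Int) (i : Int) = S.getD i 0 := hrel i hi
    rw [hKg, hSk, hdk, hSi, hdi]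
    set j' := PySem.Int.mod (j + S.getD k.toNat 0 + k) 256 with hj'
    have hj'b : 0 ≤ j' ∧ j' < 256 :=
      ⟨PySem.Int.mod_nonneg _ (by norm_num), PySem.Int.mod_lt _ (by norm_num)⟩
    have hj'cast : ((j'.toNat : Nat) : Int) = j' := Int.toNat_of_nonneg hj'b.1
    have hSj' : (PySem.List.pyGet? S j').getD 0 = S.getD j'.toNat 0 := by
      rw [pv_get_some S j' hj'b.1 (by omega), Option.getD_some]
    have hdj' : PySem.Dict.getD d j' j' = S.getD j'.toNat 0 := by
      rw [← hj'cast]; exact hrel j'.toNat (by omega)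
    rw [hSj', hdj']
    -- apply the induction hypothesis to the updated state
    apply ih (i+1) _ _ j' (by omega) (by simp [hSlen])
    intro x hx
    rw [PySem.Dict.getD_insert, PySem.Dict.getD_insert]
    by_cases hx1 : x = j'.toNat
    · have hcx : ((x : Nat) : Int) = j' := by omega
      rw [if_pos hcx, hx1, pv_getD_set_self _ _ _ (by simp only [List.length_set]; omega)]
    · have hne1 : ¬ ((x : Nat) : Int) = j' := by omega
      rw [if_neg hne1]
      by_cases hx2 : x = i
      · have hcx : ((x : Nat) : Int) = ((i : Nat) : Int) := by omega
        rw [if_pos hcx, hx2, pv_getD_set_ne _ _ _ _ (by omega),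
            pv_getD_set_self _ _ _ (by omega)]
      · have hne2 : ¬ ((x : Nat) : Int) = ((i : Nat) : Int) := by omega
        rw [if_neg hne2, pv_getD_set_ne _ _ _ _ (by omega),
            pv_getD_set_ne _ _ _ _ (by omega)]
        exact hrel x hx

theorem pv_map_getD_self (l : List Int) (h : l.length = 256) :
    (List.range 256).map (fun x => l.getD x 0) = l := by
  apply List.ext_getElem
  · simp [h]
  · intro i h1 h2
    simp only [List.getElem_map, List.getElem_range]
    rw [List.getD_eq_getElem _ _ (by omega)]

-- ===== VERDICT (by name: the statement is the Claim_ definition above) =====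
theorem ModifiedKSA_spec : Claim_equal_ModifiedKSA := by
  intro key hdom hpre
  unfold Spec_ModifiedKSA ModifiedKSA ModifiedKSA_alt
  rw [pv_keyB_eq key hpre]
  set K := pvModifiedKey key with hKdef
  have hbytes : ∀ v ∈ pvStrToBytes key, 0 ≤ v ∧ v < 256 := by
    rw [pv_strToBytes_eq]
    intro v hv
    simp only [List.mem_map] at hv
    obtain ⟨c, hc, rfl⟩ := hv
    have h' : key.toList.all pvDomChar = true := hdom
    simp only [List.all_eq_true] at h'
    have := h' c hc
    simp only [pvDomChar, Bool.or_eq_true, Bool.and_eq_true, decide_eq_true_eq,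
      beq_iff_eq] at this
    omega
  have hKmem : ∀ v ∈ K, 0 ≤ v ∧ v < 256 := pv_ext_mem _ hbytes
  have hn : 1 ≤ (pvStrToBytes key).length := by
    rw [pv_strToBytes_eq]
    simp only [List.length_map]
    rcases Nat.eq_zero_or_pos key.toList.length with h0 | h0
    · exact absurd (String.ext (by simpa using List.length_eq_zero_iff.mp h0)) hpre
    · exact h0
  have hKlen : 256 ≤ K.length := pv_ext_len _ hn
  have hS0len : pvInitS.length = 256 := by
    rw [pv_initS_eq, List.length_map, List.length_range]
  have hrel0 : ∀ x : Nat, x < 256 →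
      PySem.Dict.getD (PySem.Dict.empty : PySem.Dict Int Int) (x : Int) (x : Int) = pvInitS.getD x 0 := by
    intro x hx
    rw [pv_initS_eq, PySem.Dict.getD_empty,
        List.getD_eq_getElem _ _ (by rw [List.length_map, List.length_range]; exact hx),
        List.getElem_map, List.getElem_range]
  obtain ⟨hsim, hlen⟩ := pv_loop_sim K hKlen hKmem 256 0 pvInitS PySem.Dict.empty 0 rfl hS0len hrel0
  calc pvLoopA K 0 pvInitS 0
      = (List.range 256).map (fun x => (pvLoopA K 0 pvInitS 0).getD x 0) := (pv_map_getD_self _ hlen).symm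
    _ = (List.range 256).map (fun (i : Nat) => PySem.Dict.getD (pvLoopB K 0 PySem.Dict.empty 0) (i : Int) (i : Int)) := by
        apply List.map_congr_left
        intro x hx
        exact (hsim x (List.mem_range.mp hx)).symm
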